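-- pv_equiv track=rewrite | github.com/danielburgess/SFCRetroTools | snes.py | lorom_to_hirom
-- ===== SOURCE A (Python) =====
-- def lorom_to_hirom(in_data: list):
--     """
--     Converts a full binary rom file (list of bytes) from lorom to hirom format (doubles every bank)
--     Quick and dirty.
--     :param in_data: the original data
--     :return: the hirom data
--     """
--     final_data = [0xFF] * (len(in_data) * 2)
--
--     div = 0x8000
--     pcs = int(len(in_data) / div)
--
--     for c in range(0, pcs):
--         for d in range(0, div):
--             pc_pos = d + (c * div)
--             hirom_pos = d + (c * 0x10000)
--             final_data[hirom_pos] = 0xFF if c == 0 else in_data[pc_pos]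
--             final_data[hirom_pos + div] = in_data[pc_pos]
--     return final_data
-- ===== SOURCE B (Python) =====
-- def lorom_to_hirom(in_data: list):
--     """
--     Converts a full binary rom file (list of bytes) from lorom to hirom format (doubles every bank)
--     Built by slicing banks and concatenating, instead of writing into a preallocated buffer.
--     :param in_data: the original data
--     :return: the hirom data
--     """
--     div = 0x8000
--     pcs = len(in_data) // div
--     out = []
--     for c in range(pcs):
--         block = in_data[c * div:(c + 1) * div]
--         out += ([0xFF] * div if c == 0 else block)
--         out += block
--     out += [0xFF] * (2 * len(in_data) - len(out))
--     return out
-- ===== Notes on version B (the rewrite author's own statement) =====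
-- stated objective: faster
-- what changed: B builds the hirom image by slicing each 0x8000-byte bank and concatenating (FF-bank or bank, then bank) with one 0xFF tail pad, instead of A's preallocated 2n buffer mutated element-by-element in nested index-arithmetic loops.
import Mathlib
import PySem

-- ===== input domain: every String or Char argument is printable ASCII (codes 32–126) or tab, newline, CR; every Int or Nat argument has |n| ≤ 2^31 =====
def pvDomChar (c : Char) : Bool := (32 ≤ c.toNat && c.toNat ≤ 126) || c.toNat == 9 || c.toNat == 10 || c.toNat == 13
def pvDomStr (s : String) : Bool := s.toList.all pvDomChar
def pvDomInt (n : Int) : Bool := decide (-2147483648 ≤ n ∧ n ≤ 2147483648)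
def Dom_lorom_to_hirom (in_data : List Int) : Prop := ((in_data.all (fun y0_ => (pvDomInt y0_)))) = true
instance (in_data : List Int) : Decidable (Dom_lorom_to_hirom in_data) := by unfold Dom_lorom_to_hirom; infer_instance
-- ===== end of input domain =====

-- B builds the hirom image by concatenating per-bank slices and one tail pad instead of A's
-- per-element writes into a preallocated buffer (same O(n), measurably faster constant factor).


-- ===== PORT A =====
-- the indices pc_pos used below are always in range (pc_pos < pcs*div ≤ len),
-- so `getD _ 0` is exact for Python's `in_data[pc_pos]`
def lorom_to_hirom (in_data : List Int) : List Int :=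
  let final_data := List.replicate (in_data.length * 2) (0xFF : Int)
  let div := 0x8000
  let pcs := in_data.length / div
  (List.range pcs).foldl (fun fd c =>
    (List.range div).foldl (fun fd d =>
      let pc_pos := d + c * div
      let hirom_pos := d + c * 0x10000
      let fd := fd.set hirom_pos (if c = 0 then (0xFF : Int) else in_data.getD pc_pos 0)
      fd.set (hirom_pos + div) (in_data.getD pc_pos 0)) fd) final_data

-- ===== PORT B =====
def lorom_to_hirom_alt (in_data : List Int) : List Int :=
  let div := 0x8000
  let pcs := in_data.length / div
  let out := (List.range pcs).foldl (fun out c =>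
    let block := PySem.List.slice in_data (some ((c * div : Nat) : Int)) (some (((c + 1) * div : Nat) : Int))
    (out ++ (if c = 0 then List.replicate div (0xFF : Int) else block)) ++ block) []
  out ++ List.replicate (2 * in_data.length - out.length) (0xFF : Int)

-- ===== PRECONDITION & SPEC =====
def Spec_lorom_to_hirom (in_data : List Int) (out : List Int) : Prop := out = lorom_to_hirom_alt in_data
instance (in_data : List Int) (out : List Int) : Decidable (Spec_lorom_to_hirom in_data out) := by unfold Spec_lorom_to_hirom; infer_instance

-- ===== CLAIM (what is proved, stated in full; the proofs are below) =====
def Claim_equal_lorom_to_hirom : Prop := ∀ (in_data : List Int), Dom_lorom_to_hirom in_data → Spec_lorom_to_hirom in_data (lorom_to_hirom in_data)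

-- ===== LEMMAS AND PROOFS =====

-- one bank of the output: FF-filler (bank 0) or the bank, followed by the bank
def pvSeg (xs : List Int) (c : Nat) : List Int :=
  (if c = 0 then List.replicate 0x8000 (0xFF : Int) else (xs.drop (c * 0x8000)).take 0x8000)
    ++ (xs.drop (c * 0x8000)).take 0x8000

def pvSegs (xs : List Int) : Nat → List Int
  | 0 => []
  | p + 1 => pvSegs xs p ++ pvSeg xs p

lemma pv_set_skip (l₁ l₂ : List Int) (i : Nat) (v : Int) (h : l₁.length ≤ i) :
    (l₁ ++ l₂).set i v = l₁ ++ l₂.set (i - l₁.length) v := by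
  rw [List.set_append, if_neg (by omega)]

lemma pv_set_here (l₁ l₂ : List Int) (i : Nat) (v : Int) (h : i < l₁.length) :
    (l₁ ++ l₂).set i v = l₁.set i v ++ l₂ := by
  rw [List.set_append, if_pos h]

lemma pvBlock_length (xs : List Int) (c : Nat) (hx : (c + 1) * 0x8000 ≤ xs.length) :
    ((xs.drop (c * 0x8000)).take 0x8000).length = 0x8000 := by
  have h5 : c * 0x8000 + 0x8000 ≤ xs.length := by nlinarith
  simp only [List.length_take, List.length_drop]
  generalize hA : c * 0x8000 = A at h5 ⊢
  omega

lemma pvSeg_length (xs : List Int) (c : Nat) (h : (c + 1) * 0x8000 ≤ xs.length) :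
    (pvSeg xs c).length = 0x10000 := by
  rw [pvSeg, List.length_append, pvBlock_length xs c h]
  split_ifs
  · rw [List.length_replicate]
  · rw [pvBlock_length xs c h]

lemma pvSegs_length (xs : List Int) (p : Nat) (h : p * 0x8000 ≤ xs.length) :
    (pvSegs xs p).length = p * 0x10000 := by
  induction p with
  | zero => rfl
  | succ q ih =>
    have h2 : (q + 1) * 0x8000 ≤ xs.length := by nlinarith [h]
    have h3 : q * 0x8000 ≤ xs.length := by nlinarith [h]
    rw [pvSegs, List.length_append, ih h3, pvSeg_length xs q h2]
    ring

-- inner loop of A over the first k of the 0x8000 positions of bank c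
lemma pvInner (xs P : List Int) (c k m : Nat) (hk : k ≤ 0x8000)
    (hL : P.length = c * 0x10000) (hx : (c + 1) * 0x8000 ≤ xs.length) (hm : 0x10000 ≤ m) :
    (List.range k).foldl (fun fd d =>
      (fd.set (d + c * 0x10000) (if c = 0 then (0xFF : Int) else xs.getD (d + c * 0x8000) 0)).set
        (d + c * 0x10000 + 0x8000) (xs.getD (d + c * 0x8000) 0)) (P ++ List.replicate m (0xFF : Int))
    = P ++ ((if c = 0 then List.replicate 0x8000 (0xFF : Int) else (xs.drop (c * 0x8000)).take 0x8000).take k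
        ++ (List.replicate (0x8000 - k) (0xFF : Int)
        ++ (((xs.drop (c * 0x8000)).take 0x8000).take k
        ++ (List.replicate (0x8000 - k) (0xFF : Int)
        ++ List.replicate (m - 0x10000) (0xFF : Int))))) := by
  induction k with
  | zero =>
    rw [List.range_zero, List.foldl_nil, List.take_zero, List.take_zero, Nat.sub_zero,
      List.nil_append, List.nil_append]
    have hmm : 0x8000 + (0x8000 + (m - 0x10000)) = m := by omega
    rw [← List.replicate_add, ← List.replicate_add, hmm]
  | succ k ih =>
    have hk' : k ≤ 0x8000 := by omega
    have hklt : k < 0x8000 := by omega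
    have hYlen : ((xs.drop (c * 0x8000)).take 0x8000).length = 0x8000 := pvBlock_length xs c hx
    have hXlen : (if c = 0 then List.replicate 0x8000 (0xFF : Int)
        else (xs.drop (c * 0x8000)).take 0x8000).length = 0x8000 := by
      split_ifs
      · rw [List.length_replicate]
      · exact hYlen
    have hgetlt2 : c * 0x8000 + k < xs.length := by nlinarith
    have hcomm : k + c * 0x8000 = c * 0x8000 + k := Nat.add_comm _ _
    have hXklen : ((if c = 0 then List.replicate 0x8000 (0xFF : Int)
        else (xs.drop (c * 0x8000)).take 0x8000).take k).length = k := by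
      rw [List.length_take, hXlen]; omega
    have hYklen : (((xs.drop (c * 0x8000)).take 0x8000).take k).length = k := by
      rw [List.length_take, hYlen]; omega
    have e1 : List.replicate (0x8000 - k) (0xFF : Int)
        = (0xFF : Int) :: List.replicate (0x8000 - (k + 1)) (0xFF : Int) := by
      have h8 : 0x8000 - k = (0x8000 - (k + 1)) + 1 := by omega
      rw [h8, List.replicate_succ]
    rw [List.range_succ (n := k), List.foldl_append, ih hk']
    rw [List.foldl_cons, List.foldl_nil]
    rw [hcomm]
    -- first write: position k within bank c's first half
    rw [pv_set_skip P _ (k + c * 0x10000) _ (by rw [hL]; exact Nat.le_add_left _ _)]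
    rw [hL, Nat.add_sub_cancel]
    rw [pv_set_skip _ _ k _ (le_of_eq hXklen)]
    rw [hXklen, Nat.sub_self]
    rw [e1, List.cons_append, List.set_cons_zero]
    rw [← List.cons_append]
    -- second write: position k within bank c's second half
    have hcons : ((if c = 0 then (0xFF : Int) else xs.getD (c * 0x8000 + k) 0)
        :: List.replicate (0x8000 - (k + 1)) (0xFF : Int)).length = 0x8000 - k := by
      rw [List.length_cons, List.length_replicate]; omega
    rw [pv_set_skip P _ (k + c * 0x10000 + 0x8000) _
      (by rw [hL]; exact le_trans (Nat.le_add_left _ _) (Nat.le_add_right _ _))]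
    rw [hL]
    have i4 : k + c * 0x10000 + 0x8000 - c * 0x10000 = k + 0x8000 := by
      generalize c * 0x10000 = L; omega
    rw [i4]
    rw [pv_set_skip _ _ (k + 0x8000) _ (by rw [hXklen]; omega)]
    rw [hXklen]
    have i5 : k + 0x8000 - k = 0x8000 := by omega
    rw [i5]
    rw [pv_set_skip _ _ 0x8000 _ (by rw [hcons]; omega)]
    rw [hcons]
    have i6 : 0x8000 - (0x8000 - k) = k := by omega
    rw [i6]
    rw [pv_set_skip _ _ k _ (le_of_eq hYklen)]
    rw [hYklen, Nat.sub_self]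
    rw [pv_set_here _ _ 0 _ (by rw [List.length_cons]; omega), List.set_cons_zero]
    -- reassemble: takes of k+1 elements
    have hXk : (if c = 0 then List.replicate 0x8000 (0xFF : Int)
        else (xs.drop (c * 0x8000)).take 0x8000).take (k + 1)
        = (if c = 0 then List.replicate 0x8000 (0xFF : Int)
            else (xs.drop (c * 0x8000)).take 0x8000).take k
          ++ [if c = 0 then (0xFF : Int) else xs.getD (c * 0x8000 + k) 0] := by
      rw [List.take_succ_eq_append_getElem (by rw [hXlen]; omega)]
      congr 1
      by_cases hc : c = 0
      · simp only [if_pos hc, List.getElem_replicate]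
      · simp only [if_neg hc, List.getElem_take, List.getElem_drop]
        rw [List.getD_eq_getElem _ _ hgetlt2]
    have hYk : (((xs.drop (c * 0x8000)).take 0x8000)).take (k + 1)
        = (((xs.drop (c * 0x8000)).take 0x8000)).take k ++ [xs.getD (c * 0x8000 + k) 0] := by
      rw [List.take_succ_eq_append_getElem (by rw [hYlen]; omega)]
      congr 1
      simp only [List.getElem_take, List.getElem_drop]
      rw [List.getD_eq_getElem _ _ hgetlt2]
    rw [hXk, hYk]
    simp only [List.append_assoc, List.cons_append, List.nil_append]

-- outer loop of A over the first p banks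
lemma pvOuter (xs : List Int) (p : Nat) (hp : p ≤ xs.length / 0x8000) :
    (List.range p).foldl (fun fd c =>
      (List.range 0x8000).foldl (fun fd d =>
        (fd.set (d + c * 0x10000) (if c = 0 then (0xFF : Int) else xs.getD (d + c * 0x8000) 0)).set
          (d + c * 0x10000 + 0x8000) (xs.getD (d + c * 0x8000) 0)) fd)
      (List.replicate (xs.length * 2) (0xFF : Int))
    = pvSegs xs p ++ List.replicate (xs.length * 2 - p * 0x10000) (0xFF : Int) := by
  induction p with
  | zero =>
    rw [List.range_zero, List.foldl_nil, pvSegs]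
    have h0 : xs.length * 2 - 0 * 0x10000 = xs.length * 2 := by omega
    rw [h0, List.nil_append]
  | succ q ih =>
    have hq : q ≤ xs.length / 0x8000 := by omega
    have hx1 : (q + 1) * 0x8000 ≤ xs.length := (Nat.le_div_iff_mul_le (by norm_num)).mp hp
    have hseglen : (pvSegs xs q).length = q * 0x10000 :=
      pvSegs_length xs q (by nlinarith)
    have h6 : q * 0x10000 + 0x10000 ≤ xs.length * 2 := by nlinarith
    have hm : 0x10000 ≤ xs.length * 2 - q * 0x10000 := by
      generalize hB : q * 0x10000 = B at h6 ⊢; omega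
    rw [List.range_succ (n := q), List.foldl_append, ih hq]
    rw [List.foldl_cons, List.foldl_nil]
    rw [pvInner xs (pvSegs xs q) q 0x8000 (xs.length * 2 - q * 0x10000) le_rfl hseglen hx1 hm]
    have hsub : xs.length * 2 - q * 0x10000 - 0x10000 = xs.length * 2 - (q + 1) * 0x10000 := by
      have h7 : (q + 1) * 0x10000 = q * 0x10000 + 0x10000 := by ring
      rw [h7]
      generalize hB : q * 0x10000 = B; omega
    have htakeX : (if q = 0 then List.replicate 0x8000 (0xFF : Int)
        else (xs.drop (q * 0x8000)).take 0x8000).take 0x8000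
        = (if q = 0 then List.replicate 0x8000 (0xFF : Int)
        else (xs.drop (q * 0x8000)).take 0x8000) := by
      split_ifs
      · rw [List.take_replicate]; rfl
      · exact List.take_of_length_le (le_of_eq (pvBlock_length xs q hx1))
    have htakeY : (((xs.drop (q * 0x8000)).take 0x8000)).take 0x8000
        = (xs.drop (q * 0x8000)).take 0x8000 :=
      List.take_of_length_le (le_of_eq (pvBlock_length xs q hx1))
    rw [htakeX, htakeY, Nat.sub_self, hsub]
    rw [List.replicate_zero, List.nil_append, List.nil_append, pvSegs, pvSeg]
    simp only [List.append_assoc]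

lemma pvAltFold (xs : List Int) (p : Nat) :
    (List.range p).foldl (fun out c =>
      let block := PySem.List.slice xs (some ((c * 0x8000 : Nat) : Int)) (some (((c + 1) * 0x8000 : Nat) : Int))
      (out ++ (if c = 0 then List.replicate 0x8000 (0xFF : Int) else block)) ++ block) []
    = pvSegs xs p := by
  induction p with
  | zero => rfl
  | succ q ih =>
    rw [List.range_succ (n := q), List.foldl_append, ih]
    simp only [List.foldl_cons, List.foldl_nil]
    have hs : PySem.List.slice xs (some ((q * 0x8000 : Nat) : Int)) (some (((q + 1) * 0x8000 : Nat) : Int))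
        = (xs.drop (q * 0x8000)).take 0x8000 := by
      rw [PySem.List.slice_natCast]
      congr 1
      have : (q + 1) * 0x8000 = q * 0x8000 + 0x8000 := by ring
      rw [this]
      generalize q * 0x8000 = A; omega
    rw [pvSegs, pvSeg]
    simp only [hs, List.append_assoc]

-- ===== VERDICT (by name: the statement is the Claim_ definition above) =====
theorem lorom_to_hirom_spec : Claim_equal_lorom_to_hirom := by
  intro xs _
  show lorom_to_hirom xs = lorom_to_hirom_alt xs
  have hdiv : (xs.length / 0x8000) * 0x8000 ≤ xs.length := Nat.div_mul_le_self _ _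
  have hA : lorom_to_hirom xs
      = pvSegs xs (xs.length / 0x8000)
        ++ List.replicate (xs.length * 2 - (xs.length / 0x8000) * 0x10000) (0xFF : Int) :=
    pvOuter xs (xs.length / 0x8000) le_rfl
  have hB : lorom_to_hirom_alt xs
      = pvSegs xs (xs.length / 0x8000)
        ++ List.replicate (2 * xs.length - (pvSegs xs (xs.length / 0x8000)).length) (0xFF : Int) := by
    show (List.range (xs.length / 0x8000)).foldl _ [] ++ _ = _
    rw [pvAltFold]
  rw [hA, hB, pvSegs_length xs _ hdiv, Nat.mul_comm 2 xs.length]
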